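-- pv_equiv track=rewrite | github.com/repeater1384/Algorythm-Solving-Log | 백준/Silver/20310. 타노스/타노스.py | delete_char
-- ===== SOURCE A (Python) =====
-- def delete_char(word, char, cnt):
--     del_cnt = 0
--     word = [*word]
--     idx = 0
--     while del_cnt < cnt:
--         if word[idx] == char:
--             word[idx] = ''
--             del_cnt += 1
--
--         idx += 1
--
--     return ''.join(word)
-- ===== SOURCE B (Python) =====
-- def delete_char(word, char, cnt):
--     remaining = cnt
--     out = []
--     for c in word:
--         if remaining > 0 and c == char:
--             remaining -= 1
--         else:
--             out.append(c)
--     return ''.join(out)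
-- ===== Notes on version B (the rewrite author's own statement) =====
-- stated objective: simpler
-- what changed: Replaces A's while-loop that mutates a char list in place under an explicit index and deletion counter with a single forward pass that copies characters while a countdown skips the first cnt matches.
-- crash fix: On inputs where word contains fewer than cnt occurrences of char, A raises IndexError by running its index off the end of the list; B returns word with all occurrences of char removed. — e.g. on delete_char("abc", "z", 1): A raises IndexError, B returns "abc"
import Mathlib
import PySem

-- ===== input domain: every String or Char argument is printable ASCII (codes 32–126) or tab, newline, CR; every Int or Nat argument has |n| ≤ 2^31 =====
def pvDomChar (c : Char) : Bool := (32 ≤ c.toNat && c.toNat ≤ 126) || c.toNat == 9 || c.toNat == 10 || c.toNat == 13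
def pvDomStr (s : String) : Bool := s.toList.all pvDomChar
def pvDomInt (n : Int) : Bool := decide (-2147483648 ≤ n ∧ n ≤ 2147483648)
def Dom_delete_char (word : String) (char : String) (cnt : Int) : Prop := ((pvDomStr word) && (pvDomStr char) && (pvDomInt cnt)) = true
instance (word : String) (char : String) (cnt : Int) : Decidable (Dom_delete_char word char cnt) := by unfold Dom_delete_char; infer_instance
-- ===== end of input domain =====

-- B replaces A's index-and-counter while loop mutating the char list in place with a single
-- forward pass copying characters while a countdown skips the first cnt matches (objective:
-- simpler); B also returns (all occurrences removed) where A raises IndexError.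

-- ===== PORT A =====
-- A's `word = [*word]` is modelled as a List (List Char): each character c becomes [c],
-- the replacement by '' becomes []; ''.join is .flatten.  `word[idx] == char` on a
-- 1-character string is [c] = char.toList.  The while loop walks the list once with the
-- running index, so it is the structural recursion below over the unvisited suffix,
-- carrying del_cnt; the [] case is where Python raises IndexError (excluded by Pre_).
def loopA (charL : List Char) (cnt : Int) (ws : List (List Char)) (dc : Int) : List (List Char) :=
  if dc < cnt then
    match ws with
    | [] => []  -- Python: word[idx] raises IndexError here
    | w :: rest =>
      if w = charL then [] :: loopA charL cnt rest (dc + 1)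
      else w :: loopA charL cnt rest dc
  else ws
termination_by ws

def delete_char (word : String) (char : String) (cnt : Int) : String :=
  String.mk (loopA char.toList cnt (word.toList.map (fun c => [c])) 0).flatten

-- ===== PORT B =====
-- Source B's for loop: state (remaining, out); ''.join(out) at the end.
def delete_char_alt (word : String) (char : String) (cnt : Int) : String :=
  String.mk (word.toList.foldl
    (fun st c => if 0 < st.1 ∧ [c] = char.toList then (st.1 - 1, st.2) else (st.1, st.2 ++ [c]))
    (cnt, ([] : List Char))).2

-- ===== PRECONDITION & SPEC =====
-- Pre_ excludes exactly the inputs on which Python A raises IndexError: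
-- those where word has fewer than cnt occurrences of char.
def Pre_delete_char (word : String) (char : String) (cnt : Int) : Prop :=
  cnt ≤ ((word.toList.filter (fun c => [c] = char.toList)).length : Int)
instance (word : String) (char : String) (cnt : Int) : Decidable (Pre_delete_char word char cnt) := by
  unfold Pre_delete_char; infer_instance

def pvWitness_delete_char : String × String × Int := ("banana", "a", 2)

-- Crash-fix block: on inputs where word contains fewer than cnt occurrences of char,
-- A raises IndexError by running its index off the end of the list; B returns word with
-- all occurrences of char removed.
def Raises_delete_char (word : String) (char : String) (cnt : Int) : Prop :=
  ((word.toList.filter (fun c => [c] = char.toList)).length : Int) < cnt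
instance (word : String) (char : String) (cnt : Int) : Decidable (Raises_delete_char word char cnt) := by
  unfold Raises_delete_char; infer_instance
def pvRaiseWitness_delete_char : String × String × Int := ("abc", "z", 1)
def pvRaiseWitnessOut_delete_char : String := "abc"

def Spec_delete_char (word : String) (char : String) (cnt : Int) (out : String) : Prop := out = delete_char_alt word char cnt
instance (word : String) (char : String) (cnt : Int) (out : String) : Decidable (Spec_delete_char word char cnt out) := by unfold Spec_delete_char; infer_instance

-- ===== CLAIM (what is proved, stated in full; the proofs are below) =====
def Claim_equal_delete_char : Prop := ∀ (word : String) (char : String) (cnt : Int), Dom_delete_char word char cnt → Pre_delete_char word char cnt → Spec_delete_char word char cnt (delete_char word char cnt)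
def Claim_raises_delete_char : Prop := (∀ (word : String) (char : String) (cnt : Int), Dom_delete_char word char cnt → Raises_delete_char word char cnt → ¬ Pre_delete_char word char cnt) ∧ (Dom_delete_char (pvRaiseWitness_delete_char.1) (pvRaiseWitness_delete_char.2.1) (pvRaiseWitness_delete_char.2.2) ∧ Raises_delete_char (pvRaiseWitness_delete_char.1) (pvRaiseWitness_delete_char.2.1) (pvRaiseWitness_delete_char.2.2) ∧ delete_char_alt (pvRaiseWitness_delete_char.1) (pvRaiseWitness_delete_char.2.1) (pvRaiseWitness_delete_char.2.2) = pvRaiseWitnessOut_delete_char)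

-- ===== LEMMAS AND PROOFS =====

-- Common characterisation: remove the first n occurrences of charL.
def rmFirst (charL : List Char) : Nat → List Char → List Char
  | _, [] => []
  | 0, cs => cs
  | n + 1, c :: cs => if [c] = charL then rmFirst charL n cs else c :: rmFirst charL (n + 1) cs

theorem rmFirst_nil (charL : List Char) (n : Nat) : rmFirst charL n [] = [] := by
  cases n <;> rfl

theorem flatten_map_singleton (cs : List Char) : (cs.map (fun c => [c])).flatten = cs := by
  induction cs with
  | nil => rfl
  | cons c cs ih => simp [ih]

theorem loopA_eq (charL : List Char) (cnt : Int) (cs : List Char) (dc : Int) :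
    (loopA charL cnt (cs.map (fun c => [c])) dc).flatten = rmFirst charL (cnt - dc).toNat cs := by
  induction cs generalizing dc with
  | nil =>
    rw [rmFirst_nil]
    unfold loopA
    split <;> rfl
  | cons c cs ih =>
    unfold loopA
    by_cases h : dc < cnt
    · have hm : (cnt - dc).toNat = (cnt - (dc + 1)).toNat + 1 := by omega
      simp only [List.map_cons, if_pos h, hm]
      by_cases hc : [c] = charL
      · simp [rmFirst, hc, ih]
      · simp [rmFirst, hc, ih]
        rw [hm]
    · have hm : (cnt - dc).toNat = 0 := by omega
      cases cs with
      | nil => simp [if_neg h, hm, rmFirst]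
      | cons d ds => simp [if_neg h, hm, rmFirst, flatten_map_singleton]

theorem foldlB_eq (charL : List Char) (cs : List Char) (r : Int) (acc : List Char) :
    (cs.foldl (fun st c =>
        if 0 < st.1 ∧ [c] = charL then (st.1 - 1, st.2) else (st.1, st.2 ++ [c]))
      (r, acc)).2 = acc ++ rmFirst charL r.toNat cs := by
  induction cs generalizing r acc with
  | nil => simp [rmFirst_nil]
  | cons c cs ih =>
    simp only [List.foldl_cons]
    by_cases hr : 0 < r
    · have hm : r.toNat = (r - 1).toNat + 1 := by omega
      by_cases hc : [c] = charL
      · have hcond : 0 < r ∧ [c] = charL := And.intro hr hc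
        simp only [if_pos hcond, hm, rmFirst, if_pos hc]
        exact ih (r - 1) acc
      · simp only [hc, and_false, if_false, hm, rmFirst]
        rw [ih r (acc ++ [c]), hm, List.append_assoc, List.singleton_append]
    · have hm : r.toNat = 0 := by omega
      have h0 : ¬ (0 < r ∧ [c] = charL) := fun h => hr h.1
      cases cs with
      | nil => simp [if_neg h0, hm, rmFirst]
      | cons d ds =>
        simp only [if_neg h0, hm, rmFirst]
        rw [ih r (acc ++ [c]), hm]
        simp [rmFirst]

theorem ports_eq (word : String) (char : String) (cnt : Int) :
    delete_char word char cnt = delete_char_alt word char cnt := by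
  unfold delete_char delete_char_alt
  rw [loopA_eq, foldlB_eq]
  simp

-- ===== VERDICT (by name: the statement is the Claim_ definition above) =====
theorem delete_char_spec : Claim_equal_delete_char := by
  intro word char cnt _ _
  unfold Spec_delete_char
  exact ports_eq word char cnt

theorem delete_char_raises : Claim_raises_delete_char := by
  unfold Claim_raises_delete_char
  refine ⟨?_, by decide⟩
  intro word char cnt _ hr hp
  unfold Raises_delete_char at hr
  unfold Pre_delete_char at hp
  omega

-- self-check: the raise witness really lies in the Raises_ region (projected from the claim).
theorem pvRaiseWitness_inRegion_ok :
    Raises_delete_char (pvRaiseWitness_delete_char.1) (pvRaiseWitness_delete_char.2.1)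
      (pvRaiseWitness_delete_char.2.2) :=
  delete_char_raises.2.2.1
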